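-- pv_equiv track=rewrite | github.com/ecease/Practick | 11.2.py | can_form_word
-- ===== SOURCE A (Python) =====
-- def can_form_word(matrix, word):
--     from collections import Counter
--
--     # Собир все букв из двумер массива в один список
--     all_letters = [letter for row in matrix for letter in row]
--
--     # Счит сколько раз встречат каждая буква
--     letters_count = Counter(all_letters)
--     word_count = Counter(word)
--
--     # Проверям достаточ ли букв в матрице, чтобы состав слово
--     for char, needed in word_count.items():
--         if letters_count[char] < needed:
--             return False
--     return True
-- ===== SOURCE B (Python) =====
-- def can_form_word(matrix, word):
--     # Deplete an explicit pool of letters: remove one occurrence per needed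
--     # character; no frequency counting at all.
--     pool = [letter for row in matrix for letter in row]
--     for ch in word:
--         try:
--             pool.remove(ch)
--         except ValueError:
--             return False
--     return True
-- ===== Notes on version B (the rewrite author's own statement) =====
-- stated objective: alternative
-- what changed: B does no counting at all: it keeps the flattened matrix letters as an explicit pool list and removes one occurrence per word character (list.remove with early exit on a missing letter), instead of building two Counters and comparing their entries.
import Mathlib
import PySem

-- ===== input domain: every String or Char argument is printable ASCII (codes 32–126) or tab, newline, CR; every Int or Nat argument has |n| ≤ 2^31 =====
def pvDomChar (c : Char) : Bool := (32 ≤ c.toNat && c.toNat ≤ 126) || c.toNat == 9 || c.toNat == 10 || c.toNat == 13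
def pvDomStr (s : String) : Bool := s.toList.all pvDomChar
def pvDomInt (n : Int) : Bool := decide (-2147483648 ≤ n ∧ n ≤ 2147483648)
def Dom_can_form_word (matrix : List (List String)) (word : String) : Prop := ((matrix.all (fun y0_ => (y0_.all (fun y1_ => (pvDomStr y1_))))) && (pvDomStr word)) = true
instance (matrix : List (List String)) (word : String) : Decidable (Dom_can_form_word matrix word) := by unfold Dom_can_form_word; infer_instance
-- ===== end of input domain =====

-- B does no counting: it keeps the flattened letters as an explicit pool list and removes
-- one occurrence per word character, instead of building two Counters and comparing them.

-- ===== PORT A =====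
-- 'for char, needed in word_count.items(): if letters_count[char] < needed: return False'
def pyCheckLoop (lc : PySem.Dict String Int) : List (String × Int) → Bool
  | [] => true
  | (ch, needed) :: rest => if lc.getD ch 0 < needed then false else pyCheckLoop lc rest

def can_form_word (matrix : List (List String)) (word : String) : Bool :=
  let all_letters := matrix.flatMap (fun row => row)
  let letters_count := PySem.Dict.counter all_letters
  let word_count := PySem.Dict.counter (word.toList.map (fun c => String.ofList [c]))
  pyCheckLoop letters_count word_count.items

-- ===== PORT B =====
-- 'for ch in word: try: pool.remove(ch) except ValueError: return False'
def consumeLoop (pool : List String) : List Char → Bool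
  | [] => true
  | c :: rest =>
    match PySem.List.remove? pool (String.ofList [c]) with
    | none => false
    | some pool' => consumeLoop pool' rest

def can_form_word_alt (matrix : List (List String)) (word : String) : Bool :=
  let pool := matrix.flatMap (fun row => row)
  consumeLoop pool word.toList

-- ===== PRECONDITION & SPEC =====
def Spec_can_form_word (matrix : List (List String)) (word : String) (out : Bool) : Prop := out = can_form_word_alt matrix word
instance (matrix : List (List String)) (word : String) (out : Bool) : Decidable (Spec_can_form_word matrix word out) := by unfold Spec_can_form_word; infer_instance

-- ===== CLAIM (what is proved, stated in full; the proofs are below) =====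
def Claim_equal_can_form_word : Prop := ∀ (matrix : List (List String)) (word : String), Dom_can_form_word matrix word → Spec_can_form_word matrix word (can_form_word matrix word)

-- ===== LEMMAS AND PROOFS =====

theorem mk1_inj {c c' : Char} (h : String.ofList [c] = String.ofList [c']) : c = c' := by
  have := congrArg String.toList h
  simp at this; exact this

theorem pyCheckLoop_eq_true_iff (lc : PySem.Dict String Int) (ps : List (String × Int)) :
    pyCheckLoop lc ps = true ↔ ∀ p ∈ ps, ¬ (lc.getD p.1 0 < p.2) := by
  induction ps with
  | nil => simp [pyCheckLoop]
  | cons p rest ih =>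
    obtain ⟨ch, needed⟩ := p
    by_cases h : lc.getD ch 0 < needed
    · simp [pyCheckLoop, h]
    · simp only [pyCheckLoop, if_neg h, ih]
      constructor
      · rintro hr ⟨a, b⟩ hm
        rcases List.mem_cons.mp hm with he | hm'
        · cases he; exact h
        · exact hr _ hm'
      · intro hr p hm; exact hr p (List.mem_cons.mpr (Or.inr hm))

theorem can_form_word_eq_true_iff (matrix : List (List String)) (word : String) :
    can_form_word matrix word = true ↔
      ∀ c ∈ word.toList, word.toList.count c
        ≤ (matrix.flatMap (fun row => row)).count (String.ofList [c]) := by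
  unfold can_form_word
  rw [pyCheckLoop_eq_true_iff]
  simp only [PySem.Dict.items_counter, PySem.Dict.getD_counter, List.mem_map,
    PySem.Set.mem_ofList]
  constructor
  · intro h c hc
    have := h (String.ofList [c], ((word.toList.map (fun c => String.ofList [c])).count (String.ofList [c]) : Int))
      ⟨String.ofList [c], ⟨c, hc, rfl⟩, rfl⟩
    dsimp only at this
    rw [List.count_map_of_injective _ _ (fun _ _ => mk1_inj) c] at this
    omega
  · intro h p hp
    obtain ⟨s, ⟨c, hc, rfl⟩, rfl⟩ := hp
    rw [List.count_map_of_injective _ _ (fun _ _ => mk1_inj) c]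
    have := h c hc
    simp only [not_lt]
    omega

theorem consumeLoop_eq_true_iff (pool : List String) (cs : List Char) :
    consumeLoop pool cs = true ↔
      ∀ c ∈ cs, cs.count c ≤ pool.count (String.ofList [c]) := by
  induction cs generalizing pool with
  | nil => simp [consumeLoop]
  | cons c rest ih =>
    by_cases hm : String.ofList [c] ∈ pool
    · rw [consumeLoop, PySem.List.remove?_eq_some_erase _ _ hm]
      simp only [ih]
      constructor
      · intro h c' hc'
        rcases List.mem_cons.mp hc' with rfl | hmem
        · by_cases hcr : c' ∈ rest
          · have := h c' hcr
            rw [List.count_erase_self] at this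
            have hp : 1 ≤ pool.count (String.ofList [c']) := List.one_le_count_iff.mpr hm
            simp only [List.count_cons_self]
            omega
          · simp only [List.count_cons_self, List.count_eq_zero_of_not_mem hcr]
            exact List.one_le_count_iff.mpr hm
        · by_cases hcc : c' = c
          · subst hcc
            have := h c' hmem
            rw [List.count_erase_self] at this
            have hp : 1 ≤ pool.count (String.ofList [c']) := List.one_le_count_iff.mpr hm
            simp only [List.count_cons_self]
            omega
          · have := h c' hmem
            rw [List.count_erase_of_ne (fun he => hcc (mk1_inj he))] at this
            rw [List.count_cons_of_ne (fun he => hcc he.symm)]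
            exact this
      · intro h c' hc'
        by_cases hcc : c' = c
        · subst hcc
          have := h c' (List.mem_cons_self ..)
          rw [List.count_erase_self]
          simp only [List.count_cons_self] at this
          omega
        · rw [List.count_erase_of_ne (fun he => hcc (mk1_inj he))]
          have := h c' (List.mem_cons.mpr (Or.inr hc'))
          rwa [List.count_cons_of_ne (fun he => hcc he.symm)] at this
    · rw [consumeLoop, (PySem.List.remove?_eq_none_iff _ _).mpr hm]
      simp only [Bool.false_eq_true, false_iff]
      intro h
      have := h c (List.mem_cons_self ..)
      rw [List.count_eq_zero_of_not_mem hm] at this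
      simp [List.count_cons_self] at this
  
theorem can_form_word_alt_eq_true_iff (matrix : List (List String)) (word : String) :
    can_form_word_alt matrix word = true ↔
      ∀ c ∈ word.toList, word.toList.count c
        ≤ (matrix.flatMap (fun row => row)).count (String.ofList [c]) :=
  consumeLoop_eq_true_iff _ _

-- ===== VERDICT (by name: the statement is the Claim_ definition above) =====
theorem can_form_word_spec : Claim_equal_can_form_word := by
  intro matrix word _
  unfold Spec_can_form_word
  have h := (can_form_word_eq_true_iff matrix word).trans
    (can_form_word_alt_eq_true_iff matrix word).symm
  cases ha : can_form_word matrix word <;> cases hb : can_form_word_alt matrix word <;>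
    simp_all
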